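-- pv_equiv track=rewrite | github.com/christopherhvelonis-cell/forecast_experiment | Tools/ensure_coverage_levels.py | _normalize_row
-- ===== SOURCE A (Python) =====
-- FIELDS = ["origin", "indicator", "horizon", "level", "covered"]
--
-- def _normalize_row(r: dict, year: int) -> dict:
--     """Normalize header variants and keep only expected fields."""
--     out = {k: "" for k in FIELDS}
--     # accept both 'origin' and 'year'
--     if "origin" in r and r["origin"]:
--         out["origin"] = str(r["origin"])
--     elif "year" in r and r["year"]:
--         out["origin"] = str(r["year"])
--     else:
--         out["origin"] = str(year)
--     # other fields (case-insensitive)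
--     for k, v in r.items():
--         lk = k.lower()
--         if lk == "indicator":
--             out["indicator"] = str(v)
--         elif lk == "horizon":
--             out["horizon"] = str(v)
--         elif lk == "level":
--             out["level"] = str(v)
--         elif lk == "covered":
--             out["covered"] = str(v)
--     return out
-- ===== SOURCE B (Python) =====
-- FIELDS = ["origin", "indicator", "horizon", "level", "covered"]
--
-- def _normalize_row(r: dict, year: int) -> dict:
--     """Normalize header variants and keep only expected fields."""
--     # origin: exact-case 'origin', then 'year', truthiness fallback to the year arg
--     origin = (str(r["origin"]) if r.get("origin")
--               else str(r["year"]) if r.get("year")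
--               else str(year))
--     # field-major gather: for each expected field, search the row back-to-front
--     # for the last key that case-folds to it (first match in reversed order =
--     # last-wins, exactly as A's forward overwrite scan)
--     items = list(r.items())
--     def last_match(field):
--         for k, v in reversed(items):
--             if k.lower() == field:
--                 return str(v)
--         return ""
--     out = {"origin": origin}
--     for f in FIELDS[1:]:
--         out[f] = last_match(f)
--     return out
-- ===== Notes on version B (the rewrite author's own statement) =====
-- stated objective: alternative
-- what changed: Field-major instead of row-major: B searches the row back-to-front once per expected field and takes the first case-folded match (= A's last-wins forward overwrite), instead of A's single forward scan with a branch cascade over mutable out slots.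
import Mathlib
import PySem

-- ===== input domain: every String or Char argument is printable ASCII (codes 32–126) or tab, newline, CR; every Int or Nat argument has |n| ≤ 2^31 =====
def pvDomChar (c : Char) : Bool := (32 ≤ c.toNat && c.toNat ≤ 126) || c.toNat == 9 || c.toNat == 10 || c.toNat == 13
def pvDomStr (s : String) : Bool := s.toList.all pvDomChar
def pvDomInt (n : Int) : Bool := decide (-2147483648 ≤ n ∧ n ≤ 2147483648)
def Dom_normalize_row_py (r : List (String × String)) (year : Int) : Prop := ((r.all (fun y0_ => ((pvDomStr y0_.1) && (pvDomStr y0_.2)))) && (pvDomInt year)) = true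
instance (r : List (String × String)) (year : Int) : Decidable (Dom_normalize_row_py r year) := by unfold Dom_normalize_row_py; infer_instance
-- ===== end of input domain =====

-- B gathers field-major: one back-to-front first-match search of the row per expected
-- field, instead of A's forward scan with a branch cascade (alternative decomposition).


-- ===== PORT A =====
-- `"k" in r and r["k"]` on the assoc-list dict: first-match lookup, truthy = nonempty;
-- absent gives getD "" = "" which is falsy, exactly as in Python.
def normalize_row_py (r : List (String × String)) (year : Int) : List (String × String) :=
  -- out = {k: "" for k in FIELDS}: five fixed keys; tracked as origin plus a 4-tuple
  let origin :=
    if (((r.find? (fun p => p.1 == "origin")).map Prod.snd).getD "") ≠ "" then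
      (((r.find? (fun p => p.1 == "origin")).map Prod.snd).getD "")
    else if (((r.find? (fun p => p.1 == "year")).map Prod.snd).getD "") ≠ "" then
      (((r.find? (fun p => p.1 == "year")).map Prod.snd).getD "")
    else PySem.Int.toStr year
  -- for k, v in r.items(): branch on k.lower() and overwrite the matching field
  let s := r.foldl (fun (s : String × String × String × String) p =>
      let lk := PySem.Str.lower p.1
      if lk == "indicator" then (p.2, s.2.1, s.2.2.1, s.2.2.2)
      else if lk == "horizon" then (s.1, p.2, s.2.2.1, s.2.2.2)
      else if lk == "level" then (s.1, s.2.1, p.2, s.2.2.2)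
      else if lk == "covered" then (s.1, s.2.1, s.2.2.1, p.2)
      else s) ("", "", "", "")
  [("origin", origin), ("indicator", s.1), ("horizon", s.2.1),
   ("level", s.2.2.1), ("covered", s.2.2.2)]

-- ===== PORT B =====
-- last_match(field): scan reversed(items) for the first key case-folding to field
def pvLastMatch (r : List (String × String)) (f : String) : String :=
  ((r.reverse.find? (fun p => PySem.Str.lower p.1 == f)).map Prod.snd).getD ""

def normalize_row_py_alt (r : List (String × String)) (year : Int) : List (String × String) :=
  -- origin block exactly as in Source B (exact-case, truthiness)
  let origin :=
    if (((r.find? (fun p => p.1 == "origin")).map Prod.snd).getD "") ≠ "" then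
      (((r.find? (fun p => p.1 == "origin")).map Prod.snd).getD "")
    else if (((r.find? (fun p => p.1 == "year")).map Prod.snd).getD "") ≠ "" then
      (((r.find? (fun p => p.1 == "year")).map Prod.snd).getD "")
    else PySem.Int.toStr year
  -- out = {"origin": origin}; for f in FIELDS[1:]: out[f] = last_match(f)
  [("origin", origin), ("indicator", pvLastMatch r "indicator"),
   ("horizon", pvLastMatch r "horizon"), ("level", pvLastMatch r "level"),
   ("covered", pvLastMatch r "covered")]

-- ===== PRECONDITION & SPEC =====
def Spec_normalize_row_py (r : List (String × String)) (year : Int) (out : List (String × String)) : Prop := out = normalize_row_py_alt r year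
instance (r : List (String × String)) (year : Int) (out : List (String × String)) : Decidable (Spec_normalize_row_py r year out) := by unfold Spec_normalize_row_py; infer_instance

-- ===== CLAIM =====
def Claim_equal_normalize_row_py : Prop := ∀ (r : List (String × String)) (year : Int), Dom_normalize_row_py r year → Spec_normalize_row_py r year (normalize_row_py r year)

-- ===== LEMMAS AND PROOFS =====

-- reverse-first-match with default: appending p at the end only changes the default
theorem pv_find_snoc (l : List (String × String)) (q : String × String → Bool)
    (p : String × String) (d : String) :
    (((l ++ [p]).find? q).map Prod.snd).getD d
      = ((l.find? q).map Prod.snd).getD (if q p then p.2 else d) := by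
  induction l with
  | nil => simp [List.find?]; split <;> simp
  | cons a t ih =>
      cases h : q a with
      | true => simp [List.find?_cons_of_pos, h]
      | false =>
          rw [List.cons_append, List.find?_cons_of_neg (by simp [h]),
              List.find?_cons_of_neg (by simp [h])]
          exact ih

-- generalized last-match form with an arbitrary default
def pvLM (r : List (String × String)) (f d : String) : String :=
  ((r.reverse.find? (fun p => PySem.Str.lower p.1 == f)).map Prod.snd).getD d

-- A's branch cascade, one step, written slot-wise
theorem pv_step (s : String × String × String × String) (p : String × String) :
    (let lk := PySem.Str.lower p.1
     if lk == "indicator" then (p.2, s.2.1, s.2.2.1, s.2.2.2)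
     else if lk == "horizon" then (s.1, p.2, s.2.2.1, s.2.2.2)
     else if lk == "level" then (s.1, s.2.1, p.2, s.2.2.2)
     else if lk == "covered" then (s.1, s.2.1, s.2.2.1, p.2)
     else s)
    = (if PySem.Str.lower p.1 == "indicator" then p.2 else s.1,
       if PySem.Str.lower p.1 == "horizon" then p.2 else s.2.1,
       if PySem.Str.lower p.1 == "level" then p.2 else s.2.2.1,
       if PySem.Str.lower p.1 == "covered" then p.2 else s.2.2.2) := by
  generalize PySem.Str.lower p.1 = lk
  by_cases c1 : lk = "indicator"
  · subst c1
    simp [show (("indicator" : String) == "horizon") = false from by decide,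
          show (("indicator" : String) == "level") = false from by decide,
          show (("indicator" : String) == "covered") = false from by decide]
  · by_cases c2 : lk = "horizon"
    · subst c2
      simp [show (("horizon" : String) == "indicator") = false from by decide,
            show (("horizon" : String) == "level") = false from by decide,
            show (("horizon" : String) == "covered") = false from by decide]
    · by_cases c3 : lk = "level"
      · subst c3
        simp [show (("level" : String) == "indicator") = false from by decide,
              show (("level" : String) == "horizon") = false from by decide,
              show (("level" : String) == "covered") = false from by decide]
      · by_cases c4 : lk = "covered"
        · subst c4
          simp [show (("covered" : String) == "indicator") = false from by decide,
                show (("covered" : String) == "horizon") = false from by decide,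
                show (("covered" : String) == "level") = false from by decide]
        · simp [beq_iff_eq, c1, c2, c3, c4]

-- Loop characterization: A's branch-cascade fold computes, in each slot, the
-- last case-folded match of the row (with the slot's start value as default).
theorem pv_fold_eq (r : List (String × String)) :
    ∀ s : String × String × String × String,
      (r.foldl (fun (s : String × String × String × String) p =>
        let lk := PySem.Str.lower p.1
        if lk == "indicator" then (p.2, s.2.1, s.2.2.1, s.2.2.2)
        else if lk == "horizon" then (s.1, p.2, s.2.2.1, s.2.2.2)
        else if lk == "level" then (s.1, s.2.1, p.2, s.2.2.2)
        else if lk == "covered" then (s.1, s.2.1, s.2.2.1, p.2)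
        else s) s)
      = (pvLM r "indicator" s.1, pvLM r "horizon" s.2.1,
         pvLM r "level" s.2.2.1, pvLM r "covered" s.2.2.2) := by
  induction r with
  | nil => intro s; simp [pvLM]
  | cons p t ih =>
      intro s
      have key : ∀ f d, pvLM (p :: t) f d
          = pvLM t f (if PySem.Str.lower p.1 == f then p.2 else d) := by
        intro f d
        simp only [pvLM, List.reverse_cons]
        exact pv_find_snoc _ _ _ _
      simp only [List.foldl_cons]
      rw [ih]
      simp only [pv_step, key]

theorem normalize_row_py_eq (r : List (String × String)) (year : Int) :
    normalize_row_py r year = normalize_row_py_alt r year := by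
  have h : ∀ f, pvLM r f "" = pvLastMatch r f := fun f => rfl
  simp only [normalize_row_py, normalize_row_py_alt, pv_fold_eq r ("", "", "", ""), h]

-- ===== VERDICT =====
theorem normalize_row_py_spec : Claim_equal_normalize_row_py := by
  intro r year _
  exact normalize_row_py_eq r year
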